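-- pv_equiv track=rewrite | github.com/Bdeering1/Auto-Emails | encryption.py | hash_check
-- ===== SOURCE A (Python) =====
-- from typing import List
--
-- def hash_check(hash : List[int], base):
--   check_arr = [False] * (base-1)
--   for idx, check in enumerate(check_arr):
--     for num in hash:
--       if num == idx:
--         check_arr[idx] = True
--         break
--   return check_arr
-- ===== SOURCE B (Python) =====
-- from typing import List
--
-- def hash_check(hash : List[int], base):
--     result = [False] * (base - 1)
--     for num in hash:
--         if 0 <= num < base - 1:
--             result[num] = True
--     return result
-- ===== Notes on version B (the rewrite author's own statement) =====
-- stated objective: faster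
-- what changed: Replaces A's nested loops (for each index 0..base-2, scan the whole hash list) with a single scatter pass over hash that marks result[num] for in-range values.
import Mathlib
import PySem

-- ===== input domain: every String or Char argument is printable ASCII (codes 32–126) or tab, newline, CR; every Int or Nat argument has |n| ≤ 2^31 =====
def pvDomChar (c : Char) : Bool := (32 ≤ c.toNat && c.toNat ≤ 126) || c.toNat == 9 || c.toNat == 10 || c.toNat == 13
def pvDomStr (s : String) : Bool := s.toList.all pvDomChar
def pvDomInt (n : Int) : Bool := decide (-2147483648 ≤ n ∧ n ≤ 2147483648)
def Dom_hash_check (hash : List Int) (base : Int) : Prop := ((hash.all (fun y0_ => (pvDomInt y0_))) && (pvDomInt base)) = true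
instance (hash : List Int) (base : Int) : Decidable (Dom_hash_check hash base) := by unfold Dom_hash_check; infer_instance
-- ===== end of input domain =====

-- B replaces A's nested loops (per-index scan of hash) with one scatter pass over hash; faster in a timing run.

-- ===== PORT A =====
-- inner 'for num in hash: if num == idx: check_arr[idx] = True; break'
def hashCheckInner (hash : List Int) (idx : Nat) (arr : List Bool) : List Bool :=
  match hash with
  | [] => arr
  | num :: rest => if num = (idx : Int) then arr.set idx true else hashCheckInner rest idx arr

def hash_check (hash : List Int) (base : Int) : List Bool :=
  let check_arr := List.replicate (base - 1).toNat false
  (List.range check_arr.length).foldl (fun arr idx => hashCheckInner hash idx arr) check_arr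

-- ===== PORT B =====
def hash_check_alt (hash : List Int) (base : Int) : List Bool :=
  hash.foldl
    (fun result num =>
      if 0 ≤ num ∧ num < base - 1 then result.set num.toNat true else result)
    (List.replicate (base - 1).toNat false)

-- ===== PRECONDITION & SPEC =====
def Spec_hash_check (hash : List Int) (base : Int) (out : List Bool) : Prop := out = hash_check_alt hash base
instance (hash : List Int) (base : Int) (out : List Bool) : Decidable (Spec_hash_check hash base out) := by unfold Spec_hash_check; infer_instance

-- ===== CLAIM (what is proved, stated in full; the proofs are below) =====
def Claim_equal_hash_check : Prop := ∀ (hash : List Int) (base : Int), Dom_hash_check hash base → Spec_hash_check hash base (hash_check hash base)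

-- ===== LEMMAS AND PROOFS =====

theorem hashCheckInner_eq (hash : List Int) (idx : Nat) (arr : List Bool) :
    hashCheckInner hash idx arr = if (idx : Int) ∈ hash then arr.set idx true else arr := by
  induction hash with
  | nil => simp [hashCheckInner]
  | cons num rest ih =>
    simp only [hashCheckInner, List.mem_cons]
    by_cases h : num = (idx : Int)
    · simp [h]
    · have h2 : ¬ ((idx : Int) = num) := fun hh => h hh.symm
      rw [if_neg h, ih]
      simp [h2]

theorem foldA_length (hash : List Int) (m : Nat) (arr : List Bool) :
    ((List.range m).foldl (fun (arr : List Bool) (idx : Nat) => if (idx : Int) ∈ hash then arr.set idx true else arr) arr).length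
      = arr.length := by
  induction m generalizing arr with
  | zero => simp
  | succ m ih =>
    rw [List.range_succ, List.foldl_append]
    simp only [List.foldl_cons, List.foldl_nil]
    split
    · rw [List.length_set]; exact ih _
    · exact ih _

theorem foldA_getElem (hash : List Int) (m : Nat) (arr : List Bool) (j : Nat) (hj : j < arr.length) :
    ((List.range m).foldl (fun (arr : List Bool) (idx : Nat) => if (idx : Int) ∈ hash then arr.set idx true else arr) arr)[j]'(by rw [foldA_length]; exact hj)
      = ((decide ((j : Int) ∈ hash) && decide (j < m)) || arr[j]) := by
  induction m with
  | zero => simp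
  | succ m ih =>
    simp only [List.range_succ, List.foldl_append, List.foldl_cons, List.foldl_nil]
    by_cases hm : ((m : Int) ∈ hash)
    · simp only [if_pos hm]
      rw [List.getElem_set]
      by_cases hjm : m = j
      · subst hjm
        simp [hm]
      · rw [if_neg hjm, ih]
        have hd : decide (j < m) = decide (j < m + 1) := by
          by_cases hlt : j < m
          · simp [hlt, Nat.lt_succ_of_lt hlt]
          · have h2 : ¬ j < m + 1 := by omega
            simp [hlt, h2]
        rw [hd]
    · simp only [if_neg hm]
      rw [ih]
      by_cases hmem : ((j : Int) ∈ hash)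
      · have hne : ¬ (j = m) := by
          intro h; subst h; exact hm hmem
        have hd : decide (j < m) = decide (j < m + 1) := by
          by_cases hlt : j < m
          · simp [hlt, Nat.lt_succ_of_lt hlt]
          · have h2 : ¬ j < m + 1 := by omega
            simp [hlt, h2]
        rw [hd]
      · simp [hmem]

theorem foldB_length (base : Int) (hash : List Int) (arr : List Bool) :
    (hash.foldl (fun result num => if 0 ≤ num ∧ num < base - 1 then result.set num.toNat true else result) arr).length
      = arr.length := by
  induction hash generalizing arr with
  | nil => rfl
  | cons num rest ih =>
    simp only [List.foldl_cons]
    split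
    · rw [ih, List.length_set]
    · exact ih _

theorem foldB_getElem (base : Int) (hash : List Int) (arr : List Bool) (j : Nat)
    (hj : j < arr.length) (hjb : (j : Int) < base - 1) :
    (hash.foldl (fun result num => if 0 ≤ num ∧ num < base - 1 then result.set num.toNat true else result) arr)[j]'(by rw [foldB_length]; exact hj)
      = (decide ((j : Int) ∈ hash) || arr[j]) := by
  induction hash generalizing arr with
  | nil => simp
  | cons num rest ih =>
    simp only [List.foldl_cons, List.mem_cons]
    by_cases hc : 0 ≤ num ∧ num < base - 1
    · simp only [if_pos hc]
      rw [ih _ (by simpa using hj)]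
      rw [List.getElem_set]
      by_cases hnj : num = (j : Int)
      · have ht : num.toNat = j := by omega
        simp [hnj]
      · have ht : ¬ (num.toNat = j) := by omega
        rw [if_neg ht]
        have h2 : ¬ ((j : Int) = num) := fun hh => hnj hh.symm
        simp [h2]
    · simp only [if_neg hc]
      rw [ih _ hj]
      have hnj : ¬ ((j : Int) = num) := by
        intro h; exact hc ⟨by omega, by omega⟩
      simp [hnj]

-- ===== VERDICT (by name: the statement is the Claim_ definition above) =====
theorem hash_check_spec : Claim_equal_hash_check := by
  unfold Claim_equal_hash_check
  intro hash base _
  unfold Spec_hash_check hash_check hash_check_alt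
  simp only [List.length_replicate, hashCheckInner_eq]
  apply List.ext_getElem
  · rw [foldA_length, foldB_length]
  · intro j h1 h2
    have hj : j < (base - 1).toNat := by rw [foldA_length] at h1; simpa using h1
    have h3 : j < base.toNat - 1 := by omega
    rw [foldA_getElem hash _ _ j (by simpa using hj),
        foldB_getElem base hash _ j (by simpa using hj) (by omega)]
    simp [h3]
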